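-- pv_equiv track=rewrite | github.com/ulilu1372/Skillsmart | mytest28.py | Keymaker
-- ===== SOURCE A (Python) =====
-- def Keymaker(k):
--     door_array = []
--     for x in range(k):
--         door_array.append('0')
--     step = 1
--     for i in range(k):
--         j = step - 1
--         while j < k:
--             if door_array[j] == '1':
--                 door_array[j] = '0'
--             else:
--                 door_array[j] = '1'
--             j += step
--         step = step + 1
--     door_array = ''.join(door_array)
--     return door_array
-- ===== SOURCE B (Python) =====
-- def Keymaker(k):
--     # A door ends open iff its 1-based position has an odd number of divisors,
--     # i.e. iff the position is a perfect square: mark only those directly.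
--     arr = ['0'] * k
--     s = 1
--     while s * s <= k:
--         arr[s * s - 1] = '1'
--         s += 1
--     return ''.join(arr)
-- ===== Notes on version B (the rewrite author's own statement) =====
-- stated objective: faster
-- what changed: Replaces the full k-pass door-toggling simulation by directly marking the perfect-square positions, the closed-form result of the simulation.
import Mathlib
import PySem

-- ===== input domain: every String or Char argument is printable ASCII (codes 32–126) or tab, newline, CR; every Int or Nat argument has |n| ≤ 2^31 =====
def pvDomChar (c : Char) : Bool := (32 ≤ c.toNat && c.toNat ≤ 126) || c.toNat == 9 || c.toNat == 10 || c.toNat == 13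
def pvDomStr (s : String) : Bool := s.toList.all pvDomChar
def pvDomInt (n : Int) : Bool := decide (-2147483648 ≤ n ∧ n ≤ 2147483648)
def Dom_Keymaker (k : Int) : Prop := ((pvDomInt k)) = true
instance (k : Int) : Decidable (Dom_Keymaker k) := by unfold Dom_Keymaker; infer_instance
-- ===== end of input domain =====

-- B replaces A's O(k log k) door-toggling simulation by directly marking the
-- perfect-square positions in a single pass.

-- ===== PORT A =====
-- toggle door_array[j] between '0' and '1' (j is always a valid nonnegative index when called)
def pvToggle (door : List String) (j : Int) : List String :=
  if PySem.List.pyGetD door j "" = "1" then door.set j.toNat "0" else door.set j.toNat "1"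

-- the inner `while j < k` loop; fuel only totalizes the while (k.toNat iterations always suffice)
def pvInner (fuel : Nat) (j step k : Int) (door : List String) : List String :=
  match fuel with
  | 0 => door
  | Nat.succ f => if j < k then pvInner f (j + step) step k (pvToggle door j) else door

def Keymaker (k : Int) : String :=
  let door := (PySem.List.pyRange 0 k 1).foldl (fun acc _ => acc ++ ["0"]) []
  let res := (PySem.List.pyRange 0 k 1).foldl
      (fun (st : List String × Int) _ => (pvInner k.toNat (st.2 - 1) st.2 k st.1, st.2 + 1))
      (door, 1)
  PySem.Str.join "" res.1

-- ===== PORT B =====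
-- the `while s*s <= k` loop of Source B; fuel only totalizes the while (k.toNat iterations suffice)
def pvSetSquares (fuel : Nat) (s k : Int) (arr : List String) : List String :=
  match fuel with
  | 0 => arr
  | Nat.succ f => if s * s ≤ k then pvSetSquares f (s + 1) k (arr.set (s * s - 1).toNat "1") else arr

def Keymaker_alt (k : Int) : String :=
  PySem.Str.join "" (pvSetSquares k.toNat 1 k (List.replicate k.toNat "0"))

-- ===== PRECONDITION & SPEC =====
def Spec_Keymaker (k : Int) (out : String) : Prop := out = Keymaker_alt k
instance (k : Int) (out : String) : Decidable (Spec_Keymaker k out) := by unfold Spec_Keymaker; infer_instance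

-- ===== CLAIM (what is proved, stated in full; the proofs are below) =====
def Claim_equal_Keymaker : Prop := ∀ (k : Int), Dom_Keymaker k → Spec_Keymaker k (Keymaker k)

-- ===== LEMMAS AND PROOFS =====

def pvFlip (x : String) : String := if x = "1" then "0" else "1"

-- number of divisors of n among 1..m
def pvDivCnt (m n : Nat) : Nat := ((Finset.Icc 1 m).filter (· ∣ n)).card

-- the state of the door array after the outer loop has run steps 1..m
def pvSpecList (m K : Nat) : List String :=
  (List.range K).map (fun j => if Odd (pvDivCnt m (j + 1)) then "1" else "0")

theorem pvToggle_length (door : List String) (j : Int) :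
    (pvToggle door j).length = door.length := by
  unfold pvToggle; split <;> simp

theorem pvToggle_getElem? (door : List String) (j0 : Int) (i : Nat)
    (h0 : 0 ≤ j0) (h1 : j0 < door.length) :
    (pvToggle door j0)[i]? = if (i : Int) = j0 then door[i]?.map pvFlip else door[i]? := by
  have hj : j0.toNat < door.length := by omega
  have hget : PySem.List.pyGetD door j0 "" = door[j0.toNat] := by
    rw [PySem.List.pyGetD_eq_getElem] <;> try assumption
  unfold pvToggle
  by_cases hij : (i : Int) = j0
  · have hi : i = j0.toNat := by omega
    subst hi
    rw [if_pos hij]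
    split
    · rename_i h
      rw [hget] at h
      simp [hj, pvFlip, h]
    · rename_i h
      rw [hget] at h
      simp [hj, pvFlip, h]
  · have hi : i ≠ j0.toNat := by omega
    rw [if_neg hij]
    split <;> rw [List.getElem?_set_ne (by omega)]

theorem pvInner_getElem? (f : Nat) (j0 step k : Int) (door : List String)
    (hstep : 1 ≤ step) (hj0 : 0 ≤ j0) (hk : k ≤ (door.length : Int))
    (hfuel : k ≤ j0 + step * f) (i : Nat) :
    (pvInner f j0 step k door)[i]? =
      if j0 ≤ (i : Int) ∧ (i : Int) < k ∧ step ∣ ((i : Int) - j0)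
      then door[i]?.map pvFlip else door[i]? := by
  induction f generalizing j0 door with
  | zero =>
    push_cast at hfuel
    simp only [Int.mul_zero, Int.add_zero] at hfuel
    rw [if_neg (by omega)]
    rfl
  | succ f ih =>
    simp only [pvInner]
    split
    · rename_i hlt
      rw [ih (j0 + step) (pvToggle door j0) (by omega) (by rw [pvToggle_length]; exact hk)
          (by push_cast at hfuel ⊢; nlinarith)]
      rw [pvToggle_getElem? door j0 i hj0 (by omega)]
      by_cases hij : (i : Int) = j0
      · rw [if_pos hij]
        rw [if_neg (by omega)]
        rw [if_pos ⟨by omega, by omega, by simp [hij]⟩]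
      · rw [if_neg hij]
        by_cases hc : j0 + step ≤ (i : Int) ∧ (i : Int) < k ∧ step ∣ ((i : Int) - (j0 + step))
        · rw [if_pos hc]
          rw [if_pos ⟨by omega, hc.2.1, by
            have := hc.2.2
            have : step ∣ ((i : Int) - (j0 + step)) + step := Dvd.dvd.add this (dvd_refl step)
            simpa [sub_add, sub_sub] using (by ring_nf at this ⊢; exact this : step ∣ (i : Int) - j0)⟩]
        · rw [if_neg hc]
          rw [if_neg ?_]
          rintro ⟨ha, hb, hd⟩
          apply hc
          have hne : (i : Int) - j0 ≠ 0 := by omega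
          have hpos : 0 < (i : Int) - j0 := by omega
          have hge : step ≤ (i : Int) - j0 := Int.le_of_dvd hpos hd
          exact ⟨by omega, hb, by
            have : step ∣ ((i : Int) - j0) - step := Dvd.dvd.sub hd (dvd_refl step)
            simpa [sub_sub] using this⟩
    · rename_i hge
      rw [if_neg (by omega)]

theorem pvSetSquares_getElem? (f : Nat) (s k : Int) (arr : List String)
    (hs : 1 ≤ s) (hk : k ≤ (arr.length : Int)) (hfuel : k < (s + f) * (s + f)) (i : Nat) :
    ((∃ t : Int, s ≤ t ∧ t * t ≤ k ∧ (i : Int) = t * t - 1) →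
        (pvSetSquares f s k arr)[i]? = some "1") ∧
    ((¬ ∃ t : Int, s ≤ t ∧ t * t ≤ k ∧ (i : Int) = t * t - 1) →
        (pvSetSquares f s k arr)[i]? = arr[i]?) := by
  induction f generalizing s arr with
  | zero =>
    push_cast at hfuel
    simp only [add_zero] at hfuel
    constructor
    · rintro ⟨t, ht1, ht2, ht3⟩
      exfalso
      have : s * s ≤ t * t := by nlinarith
      omega
    · intro _; rfl
  | succ f ih =>
    simp only [pvSetSquares]
    split
    · rename_i hle
      have harr' : k ≤ ((arr.set (s * s - 1).toNat "1").length : Int) := by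
        rw [List.length_set]; exact hk
      have hfuel' : k < ((s + 1) + f) * ((s + 1) + f) := by push_cast at hfuel ⊢; nlinarith
      have ihs := ih (s + 1) (arr.set (s * s - 1).toNat "1") (by omega) harr' hfuel'
      constructor
      · rintro ⟨t, ht1, ht2, ht3⟩
        by_cases hts : t = s
        · rw [hts] at ht2 ht3
          by_cases hex : ∃ t : Int, s + 1 ≤ t ∧ t * t ≤ k ∧ (i : Int) = t * t - 1
          · exact ihs.1 hex
          · rw [ihs.2 hex]
            have htt : 1 ≤ s * s := by nlinarith
            have hi : i = (s * s - 1).toNat := by omega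
            rw [hi, List.getElem?_set_self]
            omega
        · exact ihs.1 ⟨t, by omega, ht2, ht3⟩
      · intro hno
        rw [ihs.2 (by rintro ⟨t, ht1, ht2, ht3⟩; exact hno ⟨t, by omega, ht2, ht3⟩)]
        have hss : 1 ≤ s * s := by nlinarith
        have hne : (s * s - 1).toNat ≠ i := by
          intro hcontra
          exact hno ⟨s, le_refl s, hle, by omega⟩
        exact List.getElem?_set_ne hne
    · rename_i hgt
      constructor
      · rintro ⟨t, ht1, ht2, ht3⟩
        exfalso
        have : s * s ≤ t * t := by nlinarith
        omega
      · intro _; rfl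

theorem pv_pair (n d : Nat) (hn : 0 < n) (hd : d ∣ n) (hlt : d * d < n) :
    (n / d) ∣ n ∧ n < (n / d) * (n / d) ∧ n / (n / d) = d := by
  obtain ⟨c, hc⟩ := hd
  have hd0 : 0 < d := by
    rcases Nat.eq_zero_or_pos d with h | h
    · subst h; simp at hc; omega
    · exact h
  have hcv : n / d = c := by rw [hc, Nat.mul_div_cancel_left _ hd0]
  have hc0 : 0 < c := by
    rcases Nat.eq_zero_or_pos c with h | h
    · subst h; simp at hc; omega
    · exact h
  have hdc : d < c := by nlinarith
  refine ⟨?_, ?_, ?_⟩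
  · rw [hcv]; exact ⟨d, by rw [hc]; ring⟩
  · rw [hcv]; nlinarith
  · rw [hcv, hc, Nat.mul_div_cancel _ hc0]

theorem pv_pair' (n d : Nat) (hn : 0 < n) (hd : d ∣ n) (hgt : n < d * d) :
    (n / d) ∣ n ∧ (n / d) * (n / d) < n ∧ n / (n / d) = d := by
  obtain ⟨c, hc⟩ := hd
  have hd0 : 0 < d := by
    rcases Nat.eq_zero_or_pos d with h | h
    · subst h; simp at hc; omega
    · exact h
  have hcv : n / d = c := by rw [hc, Nat.mul_div_cancel_left _ hd0]
  have hdc : c < d := by nlinarith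
  refine ⟨?_, ?_, ?_⟩
  · rw [hcv]; exact ⟨d, by rw [hc]; ring⟩
  · rw [hcv]
    rcases Nat.eq_zero_or_pos c with h | h
    · subst h; simpa using hn
    · nlinarith
  · have hc0 : 0 < c := by
      rcases Nat.eq_zero_or_pos c with h | h
      · subst h; simp at hc; omega
      · exact h
    rw [hcv, hc, Nat.mul_div_cancel _ hc0]

theorem pvOdd_card_divisors (n : Nat) (hn : 0 < n) :
    Odd n.divisors.card ↔ ∃ r : Nat, r * r = n := by
  classical
  have h1 : (n.divisors.filter fun d => d * d < n).card
      + (n.divisors.filter fun d => ¬ d * d < n).card = n.divisors.card :=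
    Finset.card_filter_add_card_filter_not (p := fun d => d * d < n) (s := n.divisors)
  have h2 : (n.divisors.filter fun d => ¬ d * d < n) =
      (n.divisors.filter fun d => d * d = n) ∪ (n.divisors.filter fun d => n < d * d) := by
    ext d
    simp only [Finset.mem_filter, Finset.mem_union]
    constructor
    · rintro ⟨hd, hlt⟩
      by_cases he : d * d = n
      · exact Or.inl ⟨hd, he⟩
      · exact Or.inr ⟨hd, by omega⟩
    · rintro (⟨hd, he⟩ | ⟨hd, hgt⟩) <;> exact ⟨hd, by omega⟩
  have hdisj : Disjoint (n.divisors.filter fun d => d * d = n)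
      (n.divisors.filter fun d => n < d * d) := by
    rw [Finset.disjoint_left]
    intro d hd1 hd2
    simp only [Finset.mem_filter] at hd1 hd2
    omega
  have h3 : (n.divisors.filter fun d => ¬ d * d < n).card =
      (n.divisors.filter fun d => d * d = n).card
        + (n.divisors.filter fun d => n < d * d).card := by
    rw [h2, Finset.card_union_of_disjoint hdisj]
  have hbij : (n.divisors.filter fun d => d * d < n).card
      = (n.divisors.filter fun d => n < d * d).card := by
    apply Finset.card_nbij' (i := fun d => n / d) (j := fun d => n / d)
    · intro d hd
      simp only [Finset.coe_filter, Set.mem_setOf_eq, Nat.mem_divisors] at hd ⊢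
      obtain ⟨⟨hdvd, hn0⟩, hlt⟩ := hd
      obtain ⟨q1, q2, _⟩ := pv_pair n d hn hdvd hlt
      exact ⟨⟨q1, hn0⟩, q2⟩
    · intro d hd
      simp only [Finset.coe_filter, Set.mem_setOf_eq, Nat.mem_divisors] at hd ⊢
      obtain ⟨⟨hdvd, hn0⟩, hgt⟩ := hd
      obtain ⟨q1, q2, _⟩ := pv_pair' n d hn hdvd hgt
      exact ⟨⟨q1, hn0⟩, q2⟩
    · intro d hd
      simp only [Finset.coe_filter, Set.mem_setOf_eq, Nat.mem_divisors] at hd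
      obtain ⟨⟨hdvd, hn0⟩, hlt⟩ := hd
      exact (pv_pair n d hn hdvd hlt).2.2
    · intro d hd
      simp only [Finset.coe_filter, Set.mem_setOf_eq, Nat.mem_divisors] at hd
      obtain ⟨⟨hdvd, hn0⟩, hgt⟩ := hd
      exact (pv_pair' n d hn hdvd hgt).2.2
  by_cases hsq : ∃ r : Nat, r * r = n
  · obtain ⟨r, hr⟩ := hsq
    have hr0 : 0 < r := by
      rcases Nat.eq_zero_or_pos r with h | h
      · subst h; simp at hr; omega
      · exact h
    have hmid : (n.divisors.filter fun d => d * d = n) = {r} := by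
      ext d
      simp only [Finset.mem_filter, Nat.mem_divisors, Finset.mem_singleton]
      constructor
      · rintro ⟨_, he⟩
        have : d * d = r * r := by omega
        exact Nat.mul_self_inj.mp this
      · intro h
        rw [h]
        exact ⟨⟨⟨r, hr.symm⟩, by omega⟩, hr⟩
    rw [hmid] at h3
    simp only [Finset.card_singleton] at h3
    constructor
    · intro _; exact ⟨r, hr⟩
    · intro _
      rw [Nat.odd_iff]
      omega
  · have hmid : (n.divisors.filter fun d => d * d = n) = ∅ := by
      ext d
      simp only [Finset.mem_filter, Finset.notMem_empty, iff_false]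
      rintro ⟨_, he⟩
      exact hsq ⟨d, he⟩
    rw [hmid] at h3
    simp only [Finset.card_empty] at h3
    constructor
    · intro hodd
      rw [Nat.odd_iff] at hodd
      omega
    · intro h; exact absurd h hsq

theorem pvDivCnt_full (K n : Nat) (h1 : 1 ≤ n) (h2 : n ≤ K) :
    pvDivCnt K n = n.divisors.card := by
  unfold pvDivCnt
  congr 1
  ext d
  simp only [Finset.mem_filter, Finset.mem_Icc, Nat.mem_divisors]
  constructor
  · rintro ⟨⟨hd1, _⟩, hd⟩; exact ⟨hd, by omega⟩
  · rintro ⟨hd, _⟩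
    have hd1 : 1 ≤ d := Nat.pos_of_dvd_of_pos hd (by omega)
    have hd2 : d ≤ n := Nat.le_of_dvd (by omega) hd
    exact ⟨⟨hd1, by omega⟩, hd⟩

theorem pvDivCnt_succ (m n : Nat) :
    pvDivCnt (m + 1) n = pvDivCnt m n + (if (m + 1) ∣ n then 1 else 0) := by
  unfold pvDivCnt
  have hins : Finset.Icc 1 (m + 1) = insert (m + 1) (Finset.Icc 1 m) := by
    ext x; simp only [Finset.mem_Icc, Finset.mem_insert]; omega
  rw [hins, Finset.filter_insert]
  split
  · rw [Finset.card_insert_of_notMem (by simp)]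
  · simp

-- initial door array
theorem pvFold_append_zero (l : List Int) (init : List String) :
    l.foldl (fun acc _ => acc ++ ["0"]) init = init ++ List.replicate l.length "0" := by
  induction l generalizing init with
  | nil => simp
  | cons x xs ih => simp [List.foldl, ih, List.replicate_succ]

theorem pvSpecList_zero (K : Nat) : pvSpecList 0 K = List.replicate K "0" := by
  unfold pvSpecList pvDivCnt
  simp

theorem pvSpecList_length (m K : Nat) : (pvSpecList m K).length = K := by
  simp [pvSpecList]

-- one outer iteration advances the spec
theorem pvSpecList_getElem?_lt (m K i : Nat) (hi : i < K) :
    (pvSpecList m K)[i]? = some (if Odd (pvDivCnt m (i + 1)) then "1" else "0") := by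
  simp [pvSpecList, hi]

theorem pvSpecList_getElem?_ge (m K i : Nat) (hi : K ≤ i) :
    (pvSpecList m K)[i]? = none := by
  rw [List.getElem?_eq_none]
  simp [pvSpecList_length, hi]

theorem pvInner_step (k : Int) (K m : Nat) (hk : 0 < k) (hK : K = k.toNat) :
    pvInner k.toNat ((m : Int) + 1 - 1) ((m : Int) + 1) k (pvSpecList m K) =
      pvSpecList (m + 1) K := by
  have hkK : (K : Int) = k := by omega
  apply List.ext_getElem?
  intro i
  have hlen : k ≤ ((pvSpecList m K).length : Int) := by rw [pvSpecList_length]; omega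
  have hfuel : k ≤ ((m : Int) + 1 - 1) + ((m : Int) + 1) * (k.toNat : Int) := by
    have : (k.toNat : Int) = k := by omega
    rw [this]; nlinarith
  rw [pvInner_getElem? k.toNat ((m : Int) + 1 - 1) ((m : Int) + 1) k (pvSpecList m K)
      (by omega) (by omega) hlen hfuel i]
  by_cases hi : i < K
  · rw [pvSpecList_getElem?_lt m K i hi, pvSpecList_getElem?_lt (m + 1) K i hi]
    have hdvd_iff : ((m : Int) + 1 ∣ (i : Int) - ((m : Int) + 1 - 1)) ↔ ((m + 1) ∣ (i + 1)) := by
      constructor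
      · intro h
        have h2 : ((m : Int) + 1) ∣ ((i : Int) - ((m : Int) + 1 - 1)) + ((m : Int) + 1) :=
          Dvd.dvd.add h (dvd_refl _)
        have h3 : ((i : Int) - ((m : Int) + 1 - 1)) + ((m : Int) + 1) = (i : Int) + 1 := by ring
        rw [h3] at h2
        exact_mod_cast h2
      · intro h
        have h2 : ((m : Int) + 1) ∣ ((i : Int) + 1) := by exact_mod_cast h
        have h3 : ((m : Int) + 1) ∣ ((i : Int) + 1) - ((m : Int) + 1) := Dvd.dvd.sub h2 (dvd_refl _)
        have h4 : ((i : Int) + 1) - ((m : Int) + 1) = (i : Int) - ((m : Int) + 1 - 1) := by ring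
        rwa [h4] at h3
    by_cases hd : (m + 1) ∣ (i + 1)
    · have hmi : m ≤ i := by
        have := Nat.le_of_dvd (by omega) hd
        omega
      rw [if_pos ⟨by omega, by omega, hdvd_iff.mpr hd⟩]
      rw [pvDivCnt_succ, if_pos hd]
      by_cases ho : Odd (pvDivCnt m (i + 1))
      · rw [if_pos ho]
        have : ¬ Odd (pvDivCnt m (i + 1) + 1) := by
          rw [Nat.odd_iff] at ho ⊢; omega
        rw [if_neg this]
        simp [pvFlip]
      · rw [if_neg ho]
        have : Odd (pvDivCnt m (i + 1) + 1) := by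
          rw [Nat.odd_iff] at ho ⊢; omega
        rw [if_pos this]
        simp [pvFlip]
    · rw [if_neg (by rintro ⟨_, _, hdv⟩; exact hd (hdvd_iff.mp hdv))]
      rw [pvDivCnt_succ, if_neg hd]
      norm_num
  · rw [pvSpecList_getElem?_ge m K i (by omega), pvSpecList_getElem?_ge (m + 1) K i (by omega)]
    rw [if_neg (by rintro ⟨_, hik, _⟩; omega)]

theorem pvOuter_fold (k : Int) (K : Nat) (hk : 0 < k) (hK : K = k.toNat)
    (l : List Int) (m : Nat) :
    l.foldl (fun (st : List String × Int) _ =>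
        (pvInner k.toNat (st.2 - 1) st.2 k st.1, st.2 + 1)) (pvSpecList m K, (m : Int) + 1) =
      (pvSpecList (m + l.length) K, ((m : Int) + l.length) + 1) := by
  induction l generalizing m with
  | nil => simp
  | cons x xs ih =>
    simp only [List.foldl_cons]
    rw [show ((m : Int) + 1 + 1) = ((m + 1 : Nat) : Int) + 1 by push_cast; ring]
    rw [pvInner_step k K m hk hK, ih (m + 1)]
    refine Prod.ext ?_ ?_
    · simp only [List.length_cons]
      congr 1
      omega
    · simp only [List.length_cons]
      push_cast
      ring

-- the two final lists agree
theorem pvLists_eq (k : Int) (hk : 0 < k) :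
    pvSpecList k.toNat k.toNat = pvSetSquares k.toNat 1 k (List.replicate k.toNat "0") := by
  have hkK : ((k.toNat : Nat) : Int) = k := by omega
  apply List.ext_getElem?
  intro i
  have hlen : k ≤ ((List.replicate k.toNat "0").length : Int) := by
    rw [List.length_replicate]; omega
  have hfuel : k < ((1 : Int) + k.toNat) * ((1 : Int) + k.toNat) := by nlinarith
  have hsq := pvSetSquares_getElem? k.toNat 1 k (List.replicate k.toNat "0") (by omega) hlen hfuel i
  by_cases hex : ∃ t : Int, 1 ≤ t ∧ t * t ≤ k ∧ (i : Int) = t * t - 1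
  · rw [hsq.1 hex]
    obtain ⟨t, ht1, ht2, ht3⟩ := hex
    have hiK : i < k.toNat := by omega
    rw [pvSpecList_getElem?_lt _ _ _ hiK]
    have hple : i + 1 ≤ k.toNat := by omega
    rw [pvDivCnt_full k.toNat (i + 1) (by omega) hple]
    have hodd : Odd (i + 1).divisors.card := by
      rw [pvOdd_card_divisors (i + 1) (by omega)]
      refine ⟨t.toNat, ?_⟩
      have : ((t.toNat : Int)) = t := by omega
      have h2 : ((t.toNat * t.toNat : Nat) : Int) = ((i + 1 : Nat) : Int) := by push_cast [this]; omega
      exact_mod_cast h2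
    rw [if_pos hodd]
  · rw [hsq.2 hex]
    by_cases hi : i < k.toNat
    · rw [pvSpecList_getElem?_lt _ _ _ hi, List.getElem?_replicate_of_lt hi]  -- name?
      have hple : i + 1 ≤ k.toNat := by omega
      rw [pvDivCnt_full k.toNat (i + 1) (by omega) hple]
      have hnodd : ¬ Odd (i + 1).divisors.card := by
        rw [pvOdd_card_divisors (i + 1) (by omega)]
        rintro ⟨r, hr⟩
        have hr0 : 0 < r := by
          rcases Nat.eq_zero_or_pos r with h | h
          · subst h; simp at hr
          · exact h
        apply hex
        refine ⟨(r : Int), by omega, ?_, ?_⟩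
        · omega
        · omega
      rw [if_neg hnodd]
    · rw [pvSpecList_getElem?_ge _ _ _ (by omega), List.getElem?_eq_none]
      rw [List.length_replicate]
      omega

-- ===== VERDICT (by name: the statement is the Claim_ definition above) =====
theorem Keymaker_spec : Claim_equal_Keymaker := by
  intro k _
  unfold Spec_Keymaker
  by_cases hk : 0 < k
  · have hA : Keymaker k = PySem.Str.join "" (pvSpecList k.toNat k.toNat) := by
      unfold Keymaker
      rw [pvFold_append_zero, PySem.List.length_pyRange_one]
      simp only [Int.sub_zero, List.nil_append]
      rw [← pvSpecList_zero]
      have := pvOuter_fold k k.toNat hk rfl (PySem.List.pyRange 0 k 1) 0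
      simp only [Nat.cast_zero, zero_add] at this
      rw [this, PySem.List.length_pyRange_one]
      simp only [Int.sub_zero]
    rw [hA]
    unfold Keymaker_alt
    rw [pvLists_eq k hk]
  · have h0 : k.toNat = 0 := by omega
    unfold Keymaker Keymaker_alt
    rw [PySem.List.pyRange_one_eq_nil (by omega)]
    simp [h0, pvSetSquares]
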